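-- pv_equiv track=rewrite | github.com/jeradkinggeo/erddap2agol | src/das_client.py | parseDasResponse
-- ===== SOURCE A (Python) =====
-- from collections import OrderedDict
--
-- def parseDasResponse(response_text):
--     data = OrderedDict()
--     current_section = None
--     section_name = None
--
--     for line in response_text.strip().splitlines():
--         line = line.strip()
--
--         # Detect the start of the Attributes section
--         if line.startswith("Attributes {"):
--             continue
--
--         # Detect the start of a new section within Attributes
--         if line.endswith("{"):
--             section_name = line.split()[0]
--             current_section = OrderedDict()
--             data[section_name] = current_section
--             continue
--
--         # Detect the end of a section
--         if line == "}":
--             section_name = None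
--             current_section = None
--             continue
--
--         # Parse the attributes within a section
--         if current_section is not None:
--             parts = line.split(maxsplit=2)
--             if len(parts) == 3:
--                 datatype, description, value = parts
--                 current_section[description] = {
--                     "datatype": datatype,
--                     "value": value.strip('";')
--                 }
--
--     return data
-- ===== SOURCE B (Python) =====
-- from collections import OrderedDict
--
-- def parseDasResponse(response_text):
--     # Phase 1: one scan over the stripped lines, collecting (section_name, attr_lines) blocks.
--     blocks = []
--     name = None
--     attrs = None
--     for raw in response_text.strip().splitlines():
--         line = raw.strip()
--         if line.startswith("Attributes {"):
--             continue
--         if line.endswith("{"):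
--             if name is not None:
--                 blocks.append((name, attrs))
--             name = line.split()[0]
--             attrs = []
--         elif line == "}":
--             if name is not None:
--                 blocks.append((name, attrs))
--             name = None
--             attrs = None
--         elif name is not None:
--             attrs.append(line)
--     if name is not None:
--         blocks.append((name, attrs))
--     # Phase 2: assemble each block into an OrderedDict; repeated section names overwrite in place.
--     data = OrderedDict()
--     for name, lines in blocks:
--         section = OrderedDict()
--         for line in lines:
--             parts = line.split(maxsplit=2)
--             if len(parts) == 3:
--                 section[parts[1]] = {"datatype": parts[0], "value": parts[2].strip('";')}
--         data[name] = section
--     return data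
-- ===== Notes on version B (the rewrite author's own statement) =====
-- stated objective: alternative
-- what changed: Replaces A's single stateful loop that mutates nested dicts via an aliased current_section with a two-phase pipeline: one scan groups lines into (section, attr-lines) blocks, then a separate pass builds each section dict and assembles the outer dict.
import Mathlib
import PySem

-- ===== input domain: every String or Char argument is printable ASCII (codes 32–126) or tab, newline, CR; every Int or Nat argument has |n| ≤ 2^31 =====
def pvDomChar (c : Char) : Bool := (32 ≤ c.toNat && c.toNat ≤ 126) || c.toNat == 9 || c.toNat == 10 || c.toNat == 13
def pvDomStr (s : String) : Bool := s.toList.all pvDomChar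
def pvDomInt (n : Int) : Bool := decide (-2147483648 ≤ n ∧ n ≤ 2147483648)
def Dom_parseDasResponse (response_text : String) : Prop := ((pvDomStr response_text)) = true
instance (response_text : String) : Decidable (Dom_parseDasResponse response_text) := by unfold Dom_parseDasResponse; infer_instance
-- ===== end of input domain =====

-- B restructures A's single aliased-mutation loop into a two-phase pipeline (collect blocks, then assemble dicts); same cost, different decomposition.

-- ===== PORT A =====
-- A's loop body: state = (data, section_name), current_section modelled by writing through data at section_name (the alias target).
def pvStepA (s : PySem.Dict String (PySem.Dict String (List (String × String))) × Option String)
    (raw : String) : PySem.Dict String (PySem.Dict String (List (String × String))) × Option String :=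
  let line := PySem.Str.strip raw
  if PySem.Str.startswith line "Attributes {" then s
  else if PySem.Str.endswith line "{" then
    let name := (PySem.Str.split₀ line).headD ""
    (s.1.insert name PySem.Dict.empty, some name)
  else if line = "}" then (s.1, none)
  else
    match s.2 with
    | some n =>
        match PySem.Str.split₀Max line 2 with
        | [datatype, description, value] =>
            (s.1.insert n ((s.1.getD n PySem.Dict.empty).insert description
              [("datatype", datatype), ("value", PySem.Str.stripChars value "\";")]), s.2)
        | _ => s
    | none => s

def parseDasResponse (response_text : String) : List (String × List (String × List (String × String))) :=
  let res := (PySem.Str.splitlines (PySem.Str.strip response_text)).foldl pvStepA (PySem.Dict.empty, none)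
  res.1.items.map (fun p => (p.1, p.2.items))

-- ===== PORT B =====
-- Phase 1 loop body: state = (finished blocks, current open block).
def pvStepB (s : List (String × List String) × Option (String × List String))
    (raw : String) : List (String × List String) × Option (String × List String) :=
  let line := PySem.Str.strip raw
  if PySem.Str.startswith line "Attributes {" then s
  else if PySem.Str.endswith line "{" then
    (s.1 ++ s.2.toList, some ((PySem.Str.split₀ line).headD "", []))
  else if line = "}" then (s.1 ++ s.2.toList, none)
  else
    match s.2 with
    | some (n, ls) => (s.1, some (n, ls ++ [line]))
    | none => s

-- Phase 2: one attribute line into a section dict.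
def pvAddAttr (sec : PySem.Dict String (List (String × String))) (line : String) :
    PySem.Dict String (List (String × String)) :=
  match PySem.Str.split₀Max line 2 with
  | [datatype, description, value] =>
      sec.insert description [("datatype", datatype), ("value", PySem.Str.stripChars value "\";")]
  | _ => sec

def pvBuildSection (lines : List String) : PySem.Dict String (List (String × String)) :=
  lines.foldl pvAddAttr PySem.Dict.empty

def pvAssemble (blocks : List (String × List String))
    (d : PySem.Dict String (PySem.Dict String (List (String × String)))) :
    PySem.Dict String (PySem.Dict String (List (String × String))) :=
  blocks.foldl (fun d b => d.insert b.1 (pvBuildSection b.2)) d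

def parseDasResponse_alt (response_text : String) : List (String × List (String × List (String × String))) :=
  let st := (PySem.Str.splitlines (PySem.Str.strip response_text)).foldl pvStepB ([], none)
  let data := pvAssemble (st.1 ++ st.2.toList) PySem.Dict.empty
  data.items.map (fun p => (p.1, p.2.items))

-- ===== PRECONDITION & SPEC =====
def Spec_parseDasResponse (response_text : String) (out : List (String × List (String × List (String × String)))) : Prop := out = parseDasResponse_alt response_text
instance (response_text : String) (out : List (String × List (String × List (String × String)))) : Decidable (Spec_parseDasResponse response_text out) := by unfold Spec_parseDasResponse; infer_instance

-- ===== CLAIM (what is proved, stated in full; the proofs are below) =====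
def Claim_equal_parseDasResponse : Prop := ∀ (response_text : String), Dom_parseDasResponse response_text → Spec_parseDasResponse response_text (parseDasResponse response_text)

-- ===== LEMMAS AND PROOFS =====

-- abstraction: a B-state determines A's state
def pvAbs (s : List (String × List String) × Option (String × List String)) :
    PySem.Dict String (PySem.Dict String (List (String × String))) × Option String :=
  (pvAssemble (s.1 ++ s.2.toList) PySem.Dict.empty, s.2.map (·.1))

theorem pvStep_comm (s : List (String × List String) × Option (String × List String)) (raw : String) :
    pvStepA (pvAbs s) raw = pvAbs (pvStepB s raw) := by
  obtain ⟨blocks, cur⟩ := s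
  unfold pvStepA pvStepB
  simp only
  split_ifs with h1 h2 h3
  · rfl
  · -- open a new section
    simp [pvAbs, pvAssemble, pvBuildSection]
  · -- close
    simp [pvAbs]
  · -- attribute line (or ignored)
    cases cur with
    | none => rfl
    | some b =>
      obtain ⟨n, ls⟩ := b
      simp only [pvAbs, Option.map_some, Option.toList_some]
      rcases hp : PySem.Str.split₀Max (PySem.Str.strip raw) 2 with _ | ⟨a, _ | ⟨b, _ | ⟨c, _ | _⟩⟩⟩ <;>
        simp [hp, pvAssemble, pvBuildSection, List.foldl_append, pvAddAttr,
          PySem.Dict.getD_insert_self, PySem.Dict.insert_insert_self]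

theorem pvFoldl_comm (lines : List String)
    (s : List (String × List String) × Option (String × List String)) :
    lines.foldl pvStepA (pvAbs s) = pvAbs (lines.foldl pvStepB s) := by
  induction lines generalizing s with
  | nil => rfl
  | cons l rest ih => simp only [List.foldl_cons, pvStep_comm, ih]

-- ===== VERDICT (by name: the statement is the Claim_ definition above) =====
theorem parseDasResponse_spec : Claim_equal_parseDasResponse := by
  intro t _
  unfold Spec_parseDasResponse parseDasResponse parseDasResponse_alt
  have h := pvFoldl_comm (PySem.Str.splitlines (PySem.Str.strip t)) ([], none)
  have h0 : pvAbs ([], none) = (PySem.Dict.empty, none) := rfl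
  rw [h0] at h
  simp only [h, pvAbs]
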